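-- pv_equiv track=rewrite | github.com/highmore9501/fretDance | midiToNote.py | compressChord
-- ===== SOURCE A (Python) =====
-- def compressChord(chordNotes):
--     """
--     压缩和弦中所有音符到0-39之间
--     """
--     newChord = []
--     for note in chordNotes:
--         while note < 0:
--             note += 12
--         while note > 39:
--             note -= 12
--         newChord.append(note)
--     result = list(set(newChord))
--
--     return result
-- ===== SOURCE B (Python) =====
-- def compressChord(chordNotes):
--     """
--     压缩和弦中所有音符到0-39之间
--     """
--     newChord = [
--         note % 12 if note < 0 else (39 - (39 - note) % 12 if note > 39 else note)
--         for note in chordNotes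
--     ]
--     return list(set(newChord))
-- ===== Notes on version B (the rewrite author's own statement) =====
-- stated objective: faster
-- what changed: Replaces A's two per-note while-loops (repeatedly adding/subtracting 12) by a closed-form modular-arithmetic normalization per note, built with a list comprehension; dedup via list(set(...)) kept.
import Mathlib
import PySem

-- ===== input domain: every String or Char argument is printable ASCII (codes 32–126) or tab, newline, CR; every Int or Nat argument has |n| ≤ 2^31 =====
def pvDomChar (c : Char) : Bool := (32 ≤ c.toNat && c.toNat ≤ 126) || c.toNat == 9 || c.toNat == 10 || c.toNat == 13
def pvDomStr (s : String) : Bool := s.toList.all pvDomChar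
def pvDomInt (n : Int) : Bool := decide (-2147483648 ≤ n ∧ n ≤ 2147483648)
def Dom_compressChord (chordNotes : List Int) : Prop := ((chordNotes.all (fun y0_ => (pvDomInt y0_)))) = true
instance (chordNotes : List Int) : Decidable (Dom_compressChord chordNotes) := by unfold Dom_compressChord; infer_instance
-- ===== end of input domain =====

-- B replaces A's two per-note while-loops by closed-form modular arithmetic (constant work per note);
-- list(set(...)) order is Python hash order: outputs are compared as sets, both ports use first-occurrence dedup.

-- ===== PORT A =====
-- `while note < 0: note += 12` — fuel (-note).toNat only makes the loop total; it exceeds the loop's iteration count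
def pvLiftUpN : Nat → Int → Int
  | 0, note => note
  | fuel + 1, note => if note < 0 then pvLiftUpN fuel (note + 12) else note

-- `while note > 39: note -= 12` — fuel (note - 39).toNat likewise exceeds the iteration count
def pvPushDownN : Nat → Int → Int
  | 0, note => note
  | fuel + 1, note => if note > 39 then pvPushDownN fuel (note - 12) else note

def compressChord (chordNotes : List Int) : List Int :=
  let newChord := chordNotes.foldl
    (fun acc note =>
      let n1 := pvLiftUpN (-note).toNat note
      let n2 := pvPushDownN (n1 - 39).toNat n1
      acc ++ [n2]) []
  PySem.Set.ofList newChord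

-- ===== PORT B =====
def pvNorm (note : Int) : Int :=
  if note < 0 then PySem.Int.mod note 12
  else if note > 39 then 39 - PySem.Int.mod (39 - note) 12
  else note

def compressChord_alt (chordNotes : List Int) : List Int :=
  PySem.Set.ofList (chordNotes.map pvNorm)

-- ===== PRECONDITION & SPEC =====
def Spec_compressChord (chordNotes : List Int) (out : List Int) : Prop := out = compressChord_alt chordNotes
instance (chordNotes : List Int) (out : List Int) : Decidable (Spec_compressChord chordNotes out) := by unfold Spec_compressChord; infer_instance

-- ===== CLAIM (what is proved, stated in full; the proofs are below) =====
def Claim_equal_compressChord : Prop := ∀ (chordNotes : List Int), Dom_compressChord chordNotes → Spec_compressChord chordNotes (compressChord chordNotes)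

-- ===== LEMMAS AND PROOFS =====

theorem pvLiftUpN_eq (fuel : Nat) (note : Int) (h : -note ≤ 12 * fuel) :
    pvLiftUpN fuel note = if note < 0 then note % 12 else note := by
  induction fuel generalizing note with
  | zero => simp only [pvLiftUpN]; split_ifs <;> omega
  | succ k ih =>
      simp only [pvLiftUpN]
      split_ifs with h1
      · rw [ih (note + 12) (by omega)]
        split_ifs <;> omega
      · rfl

theorem pvPushDownN_eq (fuel : Nat) (note : Int) (h : note - 39 ≤ 12 * fuel) :
    pvPushDownN fuel note = if note > 39 then 39 - (39 - note) % 12 else note := by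
  induction fuel generalizing note with
  | zero => simp only [pvPushDownN]; split_ifs <;> omega
  | succ k ih =>
      simp only [pvPushDownN]
      split_ifs with h1
      · rw [ih (note - 12) (by omega)]
        split_ifs <;> omega
      · rfl

theorem pvNorm_eq (note : Int) :
    pvPushDownN ((pvLiftUpN (-note).toNat note) - 39).toNat (pvLiftUpN (-note).toNat note) = pvNorm note := by
  rw [pvLiftUpN_eq (-note).toNat note (by omega)]
  unfold pvNorm
  rw [PySem.Int.mod_eq_emod_of_pos (show (0:Int) < 12 by omega),
      PySem.Int.mod_eq_emod_of_pos (show (0:Int) < 12 by omega)]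
  by_cases h : note < 0
  · simp only [h, if_true]
    have h1 : 0 ≤ note % 12 := Int.emod_nonneg note (by omega)
    have h2 : note % 12 < 12 := Int.emod_lt_of_pos note (by omega)
    rw [pvPushDownN_eq _ _ (by omega)]
    split_ifs <;> omega
  · simp only [h, if_false]
    rw [pvPushDownN_eq _ _ (by omega)]

-- ===== VERDICT (by name: the statement is the Claim_ definition above) =====
theorem compressChord_spec : Claim_equal_compressChord := by
  intro chordNotes _
  unfold Spec_compressChord compressChord compressChord_alt
  rw [PySem.List.foldl_append_singleton_eq_map]
  simp only [pvNorm_eq, List.nil_append]
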